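-- pv_equiv track=rewrite | github.com/raeez/chiral-bar-cobar | compute/scripts/_archive/automorphic_bar.py | d_colored_partition_count
-- ===== SOURCE A (Python) =====
-- def d_colored_partition_count(n: int, d: int) -> int:
--     """Number of d-colored partitions of n = coeff of q^n in prod 1/(1-q^k)^d."""
--     if n < 0: return 0
--     if n == 0: return 1
--     dp = [0] * (n + 1)
--     dp[0] = 1
--     for k in range(1, n + 1):
--         # Multiply by 1/(1-q^k)^d using accumulation
--         for _ in range(d):
--             for j in range(k, n + 1):
--                 dp[j] += dp[j - k]  # accumulates: multiplies by 1/(1-q^k)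
--     return dp[n]
-- ===== SOURCE B (Python) =====
-- def d_colored_partition_count(n: int, d: int) -> int:
--     """Number of d-colored partitions of n = coeff of q^n in prod 1/(1-q^k)^d."""
--     if n < 0:
--         return 0
--     if n == 0:
--         return 1
--     if d <= 0:
--         # the exponentiation loop below would not run: res stays [1,0,...,0], so res[n] == 0
--         return 0
--     # one-color partition numbers p(0)..p(n)
--     p = [0] * (n + 1)
--     p[0] = 1
--     for k in range(1, n + 1):
--         for j in range(k, n + 1):
--             p[j] += p[j - k]
--     # coeff of q^n in P(q)^d via binary exponentiation of polynomials truncated at q^n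
--     def mul(a, b):
--         return [sum(a[i] * b[m - i] for i in range(m + 1)) for m in range(n + 1)]
--     res = [1] + [0] * n
--     base = p
--     e = d
--     while e > 0:
--         if e % 2 == 1:
--             res = mul(res, base)
--         base = mul(base, base)
--         e //= 2
--     return res[n]
-- ===== Notes on version B (the rewrite author's own statement) =====
-- stated objective: faster
-- what changed: Instead of running the accumulation pass d times for every part size (O(n^2*d)), B computes the one-color partition polynomial once and raises it to the d-th power modulo q^(n+1) by binary exponentiation with explicit truncated-polynomial convolution (O(n^2*log d)).
import Mathlib
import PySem

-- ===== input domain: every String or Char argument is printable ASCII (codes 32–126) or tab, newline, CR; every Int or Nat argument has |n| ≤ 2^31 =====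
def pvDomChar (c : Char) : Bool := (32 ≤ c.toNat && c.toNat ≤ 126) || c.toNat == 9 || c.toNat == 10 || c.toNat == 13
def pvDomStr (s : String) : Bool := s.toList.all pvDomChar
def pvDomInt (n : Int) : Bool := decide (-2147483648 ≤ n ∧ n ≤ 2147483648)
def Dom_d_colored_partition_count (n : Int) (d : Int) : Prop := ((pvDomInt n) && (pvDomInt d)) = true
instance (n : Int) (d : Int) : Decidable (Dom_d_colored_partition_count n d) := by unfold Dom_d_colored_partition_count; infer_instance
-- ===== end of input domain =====

-- B replaces A's d repeated accumulation passes per part size by one one-color polynomial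
-- raised to the d-th power mod q^(n+1) by binary exponentiation (asymptotically faster in d).

-- ===== PORT A =====
-- All list indices in the loops are nonnegative and in range (k ≤ j ≤ n < length dp), so
-- Nat-indexed getD/setIfInBounds on an Array port Python's dp[j], dp[j-k] exactly;
-- range(1,n+1) with n ≥ 1 is List.range' 1 n.toNat, range(k,n+1) is
-- List.range' k (n.toNat+1-k), and range(d) is List.range d.toNat (empty for d ≤ 0,
-- exactly as in Python).
def d_colored_partition_count (n : Int) (d : Int) : Int :=
  if n < 0 then 0
  else if n = 0 then 1
  else
    let N := n.toNat
    let dp0 : Array Int := (Array.replicate (N + 1) 0).setIfInBounds 0 1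
    let dp := (List.range' 1 N).foldl (fun dp k =>
      (List.range d.toNat).foldl (fun dp _ =>
        (List.range' k (N + 1 - k)).foldl (fun dp j =>
          dp.setIfInBounds j (dp.getD j 0 + dp.getD (j - k) 0)) dp) dp) dp0
    dp.getD N 0

-- ===== PORT B =====
-- Source B's mul(a,b): truncated polynomial product, entry m = sum_{i=0..m} a[i]*b[m-i]
-- (all indices are in range, so getD ports the Python indexing exactly).
def pvMulTrunc (N : Nat) (a b : Array Int) : Array Int :=
  ((List.range (N + 1)).map (fun m =>
    ((List.range (m + 1)).map (fun i => a.getD i 0 * b.getD (m - i) 0)).sum)).toArray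

-- Source B's while-loop: binary exponentiation of base into res; e % 2 and e //= 2 are
-- Python's floor mod/div, ported with the PySem primitives.
def pvPowLoop (N : Nat) (res base : Array Int) (e : Int) : Array Int :=
  if 0 < e then
    pvPowLoop N (if PySem.Int.mod e 2 = 1 then pvMulTrunc N res base else res)
      (pvMulTrunc N base base) (PySem.Int.floordiv e 2)
  else res
termination_by e.toNat
decreasing_by
  rw [PySem.Int.floordiv_eq_ediv_of_pos (by omega)]
  omega

def d_colored_partition_count_alt (n : Int) (d : Int) : Int :=
  if n < 0 then 0
  else if n = 0 then 1
  else if d ≤ 0 then 0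
  else
    let N := n.toNat
    let p := (List.range' 1 N).foldl (fun p k =>
        (List.range' k (N + 1 - k)).foldl (fun p j =>
          p.setIfInBounds j (p.getD j 0 + p.getD (j - k) 0)) p)
      ((Array.replicate (N + 1) (0 : Int)).setIfInBounds 0 1)
    (pvPowLoop N ((1 : Int) :: List.replicate N 0).toArray p d).getD N 0

-- ===== PRECONDITION & SPEC =====
def Spec_d_colored_partition_count (n : Int) (d : Int) (out : Int) : Prop := out = d_colored_partition_count_alt n d
instance (n : Int) (d : Int) (out : Int) : Decidable (Spec_d_colored_partition_count n d out) := by unfold Spec_d_colored_partition_count; infer_instance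

-- ===== CLAIM (what is proved, stated in full; the proofs are below) =====
def Claim_equal_d_colored_partition_count : Prop := ∀ (n : Int) (d : Int), Dom_d_colored_partition_count n d → Spec_d_colored_partition_count n d (d_colored_partition_count n d)

-- ===== LEMMAS AND PROOFS =====

-- `pvApprox N xs f`: the list agrees with the power series f on all coefficients up to N.
def pvApprox (N : Nat) (xs : List Int) (f : PowerSeries ℤ) : Prop :=
  ∀ m : Nat, m ≤ N → xs.getD m 0 = PowerSeries.coeff m f

-- geometric series in X^k : 1 + X^k + X^(2k) + …
def pvGeom (k : Nat) : PowerSeries ℤ := PowerSeries.mk (fun m => if k ∣ m then 1 else 0)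

theorem pvGetD_set_ne (xs : List Int) (i j : Nat) (v : Int) (h : i ≠ j) :
    (xs.set i v).getD j 0 = xs.getD j 0 := by
  simp [List.getD, List.getElem?_set_ne h]

theorem pvGetD_set_self (xs : List Int) (i : Nat) (v : Int) (h : i < xs.length) :
    (xs.set i v).getD i 0 = v := by
  simp [List.getD, h]

theorem pvSumRange (f : ℕ → ℤ) (n : ℕ) :
    ((List.range n).map f).sum = ∑ i ∈ Finset.range n, f i := by
  induction n with
  | zero => simp
  | succ n ih => simp [List.range_succ, Finset.sum_range_succ, ih]

theorem pvGeom_eq (k : Nat) (hk : 1 ≤ k) :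
    pvGeom k = 1 + PowerSeries.X ^ k * pvGeom k := by
  ext m
  rw [map_add, PowerSeries.coeff_one, PowerSeries.coeff_X_pow_mul']
  simp only [pvGeom, PowerSeries.coeff_mk]
  rcases Nat.eq_zero_or_pos m with rfl | hm
  · simp; omega
  · have hne : ¬ m = 0 := by omega
    by_cases hkm : k ≤ m
    · have hiff : (k ∣ m) = (k ∣ m - k) := by
        apply propext
        constructor
        · intro h; exact Nat.dvd_sub h dvd_rfl
        · intro h; have h2 := Nat.dvd_add h (dvd_refl k); rwa [Nat.sub_add_cancel hkm] at h2
      rw [if_neg hne, if_pos hkm, zero_add]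
      simp only [hiff]
    · have hnd : ¬ k ∣ m := fun h => hkm (Nat.le_of_dvd hm h)
      rw [if_neg hne, if_neg hkm, if_neg hnd, zero_add]

-- List-level copies of Source B's mul and while-loop, used only by the proofs (the ports
-- above compute the same values on Arrays; the pv*_bridge lemmas connect the two).
def pvMulTruncL (N : Nat) (a b : List Int) : List Int :=
  (List.range (N + 1)).map (fun m =>
    ((List.range (m + 1)).map (fun i => a.getD i 0 * b.getD (m - i) 0)).sum)

def pvPowLoopL (N : Nat) (res base : List Int) (e : Int) : List Int :=
  if 0 < e then
    pvPowLoopL N (if PySem.Int.mod e 2 = 1 then pvMulTruncL N res base else res)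
      (pvMulTruncL N base base) (PySem.Int.floordiv e 2)
  else res
termination_by e.toNat
decreasing_by
  rw [PySem.Int.floordiv_eq_ediv_of_pos (by omega)]
  omega

theorem pvAGetD (a : Array Int) (i : Nat) : a.getD i 0 = a.toList.getD i 0 := by
  simp only [Array.getD, List.getD]
  split
  · rename_i h
    rw [List.getElem?_eq_getElem (by simpa using h)]
    simp
  · rename_i h
    rw [List.getElem?_eq_none (by simpa using Nat.le_of_not_lt h)]
    rfl

theorem pvASet (a : Array Int) (i : Nat) (v : Int) :
    (a.setIfInBounds i v).toList = a.toList.set i v := Array.toList_setIfInBounds ..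

theorem pvPass_bridge (k : Nat) (L : List Nat) (a : Array Int) :
    (L.foldl (fun dp j => dp.setIfInBounds j (dp.getD j 0 + dp.getD (j - k) 0)) a).toList
    = L.foldl (fun dp j => dp.set j (dp.getD j 0 + dp.getD (j - k) 0)) a.toList := by
  induction L generalizing a with
  | nil => rfl
  | cons j L ih =>
    rw [List.foldl_cons, List.foldl_cons, ih, pvASet, pvAGetD, pvAGetD]

theorem pvIter_bridge (N k : Nat) (L : List Nat) (a : Array Int) :
    (L.foldl (fun dp _ => (List.range' k (N + 1 - k)).foldl
        (fun dp j => dp.setIfInBounds j (dp.getD j 0 + dp.getD (j - k) 0)) dp) a).toList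
    = L.foldl (fun dp _ => (List.range' k (N + 1 - k)).foldl
        (fun dp j => dp.set j (dp.getD j 0 + dp.getD (j - k) 0)) dp) a.toList := by
  induction L generalizing a with
  | nil => rfl
  | cons x L ih => rw [List.foldl_cons, List.foldl_cons, ih, pvPass_bridge]

theorem pvFoldA_bridge (N : Nat) (t : Nat) (L : List Nat) (a : Array Int) :
    (L.foldl (fun dp k => (List.range t).foldl (fun dp _ =>
        (List.range' k (N + 1 - k)).foldl (fun dp j =>
          dp.setIfInBounds j (dp.getD j 0 + dp.getD (j - k) 0)) dp) dp) a).toList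
    = L.foldl (fun dp k => (List.range t).foldl (fun dp _ =>
        (List.range' k (N + 1 - k)).foldl (fun dp j =>
          dp.set j (dp.getD j 0 + dp.getD (j - k) 0)) dp) dp) a.toList := by
  induction L generalizing a with
  | nil => rfl
  | cons k L ih => rw [List.foldl_cons, List.foldl_cons, ih, pvIter_bridge]

theorem pvFoldB_bridge (N : Nat) (L : List Nat) (a : Array Int) :
    (L.foldl (fun dp k =>
        (List.range' k (N + 1 - k)).foldl (fun dp j =>
          dp.setIfInBounds j (dp.getD j 0 + dp.getD (j - k) 0)) dp) a).toList
    = L.foldl (fun dp k =>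
        (List.range' k (N + 1 - k)).foldl (fun dp j =>
          dp.set j (dp.getD j 0 + dp.getD (j - k) 0)) dp) a.toList := by
  induction L generalizing a with
  | nil => rfl
  | cons k L ih => rw [List.foldl_cons, List.foldl_cons, ih, pvPass_bridge]

theorem pvTA (l : List Int) : l.toArray.toList = l := rfl

theorem pvMulTrunc_bridge (N : Nat) (a b : Array Int) :
    (pvMulTrunc N a b).toList = pvMulTruncL N a.toList b.toList := by
  simp only [pvMulTrunc, pvMulTruncL, pvTA, pvAGetD]

theorem pvPow_bridge (N : Nat) (res base : Array Int) (e : Int) :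
    (pvPowLoop N res base e).toList = pvPowLoopL N res.toList base.toList e := by
  have main : ∀ (t : Nat) (e : Int), e.toNat = t → ∀ (res base : Array Int),
      (pvPowLoop N res base e).toList = pvPowLoopL N res.toList base.toList e := by
    intro t
    induction t using Nat.strong_induction_on with
    | _ t IH =>
    intro e het res base
    rw [pvPowLoop, pvPowLoopL]
    by_cases he : 0 < e
    · rw [if_pos he, if_pos he]
      have hdiv : PySem.Int.floordiv e 2 = e / 2 := PySem.Int.floordiv_eq_ediv_of_pos (by omega)
      have hrec := IH (PySem.Int.floordiv e 2).toNat (by rw [hdiv]; omega)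
        (PySem.Int.floordiv e 2) rfl
        (if PySem.Int.mod e 2 = 1 then pvMulTrunc N res base else res) (pvMulTrunc N base base)
      rw [hrec, pvMulTrunc_bridge]
      by_cases hm : PySem.Int.mod e 2 = 1
      · rw [if_pos hm, if_pos hm, pvMulTrunc_bridge]
      · rw [if_neg hm, if_neg hm]
    · rw [if_neg he, if_neg he]
  exact main e.toNat e rfl res base

theorem pvMulTruncL_approx (N : Nat) (a b : List Int) (f g : PowerSeries ℤ)
    (ha : pvApprox N a f) (hb : pvApprox N b g) : pvApprox N (pvMulTruncL N a b) (f * g) := by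
  intro m hm
  have hm' : m < ((List.range (N + 1)).map (fun m =>
      ((List.range (m + 1)).map (fun i => a.getD i 0 * b.getD (m - i) 0)).sum)).length := by
    simp; omega
  unfold pvMulTruncL
  rw [List.getD_eq_getElem _ _ hm']
  simp only [List.getElem_map, List.getElem_range]
  rw [pvSumRange, PowerSeries.coeff_mul, Finset.Nat.sum_antidiagonal_eq_sum_range_succ_mk]
  refine Finset.sum_congr rfl (fun i hi => ?_)
  rw [Finset.mem_range] at hi
  rw [ha i (by omega), hb (m - i) (by omega)]

-- characterization of one accumulation pass (the j-loop for a fixed part size k)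
theorem pvPass_char (N k : Nat) (hk : 1 ≤ k) (dp : List Int) (hlen : dp.length = N + 1)
    (c : Nat) (hc : c ≤ N + 1 - k) :
    ((List.range' k c).foldl (fun dp j => dp.set j (dp.getD j 0 + dp.getD (j - k) 0)) dp).length = N + 1 ∧
    (∀ j, j < k ∨ k + c ≤ j →
      ((List.range' k c).foldl (fun dp j => dp.set j (dp.getD j 0 + dp.getD (j - k) 0)) dp).getD j 0 = dp.getD j 0) ∧
    (∀ j, k ≤ j → j < k + c →
      ((List.range' k c).foldl (fun dp j => dp.set j (dp.getD j 0 + dp.getD (j - k) 0)) dp).getD j 0 =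
      ((List.range' k c).foldl (fun dp j => dp.set j (dp.getD j 0 + dp.getD (j - k) 0)) dp).getD (j - k) 0 + dp.getD j 0) := by
  induction c with
  | zero => exact ⟨hlen, fun j _ => rfl, fun j h1 h2 => by omega⟩
  | succ c ih =>
    obtain ⟨ihlen, ihout, ihrec⟩ := ih (by omega)
    rw [List.range'_1_concat, List.foldl_append, List.foldl_cons, List.foldl_nil]
    set out := (List.range' k c).foldl (fun dp j => dp.set j (dp.getD j 0 + dp.getD (j - k) 0)) dp with hout
    have hkc : k + c < out.length := by omega
    have hsub : k + c - k = c := by omega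
    refine ⟨by simp [ihlen], ?_, ?_⟩
    · intro j hj
      rw [pvGetD_set_ne _ _ _ _ (by omega)]
      exact ihout j (by omega)
    · intro j h1 h2
      by_cases hj : j = k + c
      · subst hj
        rw [pvGetD_set_self _ _ _ hkc, hsub, pvGetD_set_ne _ _ _ _ (by omega)]
        rw [ihout (k + c) (Or.inr le_rfl)]
        ring
      · have hjc : j < k + c := by omega
        rw [pvGetD_set_ne _ _ _ _ (by omega), pvGetD_set_ne _ _ _ _ (by omega)]
        exact ihrec j h1 hjc

theorem pvPass_approx (N k : Nat) (hk : 1 ≤ k) (dp : List Int) (f : PowerSeries ℤ)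
    (hlen : dp.length = N + 1) (hdp : pvApprox N dp f) :
    pvApprox N ((List.range' k (N + 1 - k)).foldl (fun dp j =>
      dp.set j (dp.getD j 0 + dp.getD (j - k) 0)) dp) (pvGeom k * f) := by
  obtain ⟨hl, huntouched, hrec⟩ := pvPass_char N k hk dp hlen (N + 1 - k) le_rfl
  intro m hm
  induction m using Nat.strong_induction_on with
  | _ m IH =>
  have hco : PowerSeries.coeff m (pvGeom k * f) =
      PowerSeries.coeff m f + (if k ≤ m then PowerSeries.coeff (m - k) (pvGeom k * f) else 0) := by
    conv_lhs => rw [pvGeom_eq k hk]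
    rw [add_mul, one_mul, map_add, mul_assoc, PowerSeries.coeff_X_pow_mul']
  by_cases hkm : k ≤ m
  · rw [hco, if_pos hkm, hrec m hkm (by omega), IH (m - k) (by omega) (by omega),
      hdp m hm]
    ring
  · rw [hco, if_neg hkm, huntouched m (Or.inl (by omega)), hdp m hm, add_zero]

-- d.toNat-fold iteration of the pass for a fixed k
theorem pvIter_approx (N k : Nat) (hk : 1 ≤ k) (t : Nat) (dp : List Int) (f : PowerSeries ℤ)
    (hlen : dp.length = N + 1) (hdp : pvApprox N dp f) :
    ((List.range t).foldl (fun dp _ =>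
        (List.range' k (N + 1 - k)).foldl (fun dp j =>
          dp.set j (dp.getD j 0 + dp.getD (j - k) 0)) dp) dp).length = N + 1 ∧
    pvApprox N ((List.range t).foldl (fun dp _ =>
        (List.range' k (N + 1 - k)).foldl (fun dp j =>
          dp.set j (dp.getD j 0 + dp.getD (j - k) 0)) dp) dp) (pvGeom k ^ t * f) := by
  induction t with
  | zero => simpa using ⟨hlen, hdp⟩
  | succ t ih =>
    obtain ⟨ihlen, ihapx⟩ := ih
    rw [List.range_succ, List.foldl_append, List.foldl_cons, List.foldl_nil]
    constructor
    · exact (pvPass_char N k hk _ ihlen (N + 1 - k) le_rfl).1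
    · have := pvPass_approx N k hk _ _ ihlen ihapx
      have heq : pvGeom k * (pvGeom k ^ t * f) = pvGeom k ^ (t + 1) * f := by ring
      rwa [heq] at this

-- the outer fold over the part sizes
theorem pvFoldA_approx (N : Nat) (t : Nat) (L : List Nat) (hL : ∀ k ∈ L, 1 ≤ k)
    (dp : List Int) (f : PowerSeries ℤ) (hlen : dp.length = N + 1) (hdp : pvApprox N dp f) :
    pvApprox N (L.foldl (fun dp k =>
      (List.range t).foldl (fun dp _ =>
        (List.range' k (N + 1 - k)).foldl (fun dp j =>
          dp.set j (dp.getD j 0 + dp.getD (j - k) 0)) dp) dp) dp)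
      ((L.map (fun k => pvGeom k ^ t)).prod * f) := by
  induction L generalizing dp f with
  | nil => simpa using hdp
  | cons k L ihL =>
    rw [List.foldl_cons]
    obtain ⟨hlen', hapx'⟩ := pvIter_approx N k (hL k (by simp)) t dp f hlen hdp
    have := ihL (fun k hkk => hL k (by simp [hkk])) _ _ hlen' hapx'
    have heq : (L.map (fun k => pvGeom k ^ t)).prod * (pvGeom k ^ t * f) =
        ((k :: L).map (fun k => pvGeom k ^ t)).prod * f := by
      simp [List.prod_cons]; ring
    rwa [heq] at this

-- B's single-pass fold (one-color polynomial)
theorem pvFoldB_approx (N : Nat) (L : List Nat) (hL : ∀ k ∈ L, 1 ≤ k)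
    (dp : List Int) (f : PowerSeries ℤ) (hlen : dp.length = N + 1) (hdp : pvApprox N dp f) :
    pvApprox N (L.foldl (fun dp k =>
        (List.range' k (N + 1 - k)).foldl (fun dp j =>
          dp.set j (dp.getD j 0 + dp.getD (j - k) 0)) dp)
      dp) ((L.map pvGeom).prod * f) := by
  induction L generalizing dp f with
  | nil => simpa using hdp
  | cons k L ihL =>
    rw [List.foldl_cons]
    have hk1 : 1 ≤ k := hL k (by simp)
    have hlen' := (pvPass_char N k hk1 dp hlen (N + 1 - k) le_rfl).1
    have hapx' := pvPass_approx N k hk1 dp f hlen hdp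
    have := ihL (fun k hkk => hL k (by simp [hkk])) _ _ hlen' hapx'
    have heq : (L.map pvGeom).prod * (pvGeom k * f) = ((k :: L).map pvGeom).prod * f := by
      simp [List.prod_cons]; ring
    rwa [heq] at this

theorem pvPowLoopL_approx (N : Nat) (res base : List Int) (R B : PowerSeries ℤ) (e : Int)
    (hres : pvApprox N res R) (hbase : pvApprox N base B) :
    pvApprox N (pvPowLoopL N res base e) (R * B ^ e.toNat) := by
  have main : ∀ (t : Nat) (e : Int), e.toNat = t → ∀ (res base : List Int) (R B : PowerSeries ℤ),
      pvApprox N res R → pvApprox N base B →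
      pvApprox N (pvPowLoopL N res base e) (R * B ^ e.toNat) := by
    intro t
    induction t using Nat.strong_induction_on with
    | _ t IH =>
    intro e het res base R B hres hbase
    rw [pvPowLoopL]
    by_cases he : 0 < e
    · rw [if_pos he]
      have hdiv : PySem.Int.floordiv e 2 = e / 2 := PySem.Int.floordiv_eq_ediv_of_pos (by omega)
      have hmod : PySem.Int.mod e 2 = e % 2 := PySem.Int.mod_eq_emod_of_pos (by omega)
      have hrec := IH (e / 2).toNat (by omega) (e / 2) rfl
        (if PySem.Int.mod e 2 = 1 then pvMulTruncL N res base else res) (pvMulTruncL N base base)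
        (R * B ^ (e % 2).toNat) (B * B)
        (by
          by_cases hm : PySem.Int.mod e 2 = 1
          · rw [if_pos hm]
            have : (e % 2).toNat = 1 := by rw [hmod] at hm; omega
            rw [this, pow_one]
            exact pvMulTruncL_approx N res base R B hres hbase
          · rw [if_neg hm]
            have : (e % 2).toNat = 0 := by rw [hmod] at hm; omega
            rw [this, pow_zero, mul_one]
            exact hres)
        (pvMulTruncL_approx N base base B B hbase hbase)
      have heq : R * B ^ (e % 2).toNat * (B * B) ^ (e / 2).toNat = R * B ^ e.toNat := by
        have harith : (e % 2).toNat + 2 * ((e / 2).toNat) = e.toNat := by omega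
        rw [← sq, ← pow_mul, mul_assoc, ← pow_add, harith]
      rw [hdiv]
      rwa [heq] at hrec
    · rw [if_neg he]
      have : e.toNat = 0 := by omega
      rw [this, pow_zero, mul_one]
      exact hres
  exact main e.toNat e rfl res base R B hres hbase

theorem pvProdPow (L : List Nat) (t : Nat) :
    (L.map (fun k => pvGeom k ^ t)).prod = (L.map pvGeom).prod ^ t := by
  induction L with
  | nil => simp
  | cons k L ih => simp [List.prod_cons, ih, mul_pow]

theorem pvInit_approx (N : Nat) : pvApprox N ((List.replicate (N + 1) (0 : Int)).set 0 1) 1 := by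
  intro m hm
  rcases Nat.eq_zero_or_pos m with rfl | hmp
  · rw [pvGetD_set_self _ _ _ (by simp), PowerSeries.coeff_zero_eq_constantCoeff]
    simp
  · rw [pvGetD_set_ne _ _ _ _ (by omega), PowerSeries.coeff_one, if_neg (by omega)]
    simp only [List.getD, List.getElem?_replicate]
    split <;> simp

theorem pvRes0_approx (N : Nat) : pvApprox N ((1 : Int) :: List.replicate N 0) 1 := by
  intro m hm
  rcases Nat.eq_zero_or_pos m with rfl | hmp
  · simp
  · rw [PowerSeries.coeff_one, if_neg (by omega)]
    obtain ⟨m', rfl⟩ : ∃ m', m = m' + 1 := ⟨m - 1, by omega⟩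
    rw [List.getD_cons_succ]
    simp only [List.getD, List.getElem?_replicate]
    split <;> simp

theorem d_colored_partition_count_spec' : ∀ (n d : Int),
    d_colored_partition_count n d = d_colored_partition_count_alt n d := by
  intro n d
  unfold d_colored_partition_count d_colored_partition_count_alt
  by_cases h1 : n < 0
  · simp [h1]
  · rw [if_neg h1, if_neg h1]
    by_cases h2 : n = 0
    · simp [h2]
    · rw [if_neg h2, if_neg h2]
      by_cases h3 : d ≤ 0
       -- d ≤ 0: A's color loop runs zero times, so dp stays [1,0,...,0] and dp[n] = 0
      · rw [if_pos h3]
        dsimp only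
        set N := n.toNat with hN
        have hd0 : d.toNat = 0 := by omega
        rw [hd0]
        have hfold : ∀ (L : List Nat) (a : Array Int), L.foldl (fun dp k =>
            (List.range 0).foldl (fun dp _ =>
              (List.range' k (N + 1 - k)).foldl (fun dp j =>
                dp.setIfInBounds j (dp.getD j 0 + dp.getD (j - k) 0)) dp) dp) a = a := by
          intro L
          induction L with
          | nil => intro a; rfl
          | cons k L ih => intro a; rw [List.foldl_cons]; exact ih a
        rw [hfold]
        rw [pvAGetD, pvASet, Array.toList_replicate]
        have hz := pvInit_approx N N le_rfl
        rw [PowerSeries.coeff_one, if_neg (by omega)] at hz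
        exact hz
      · rw [if_neg h3]
        dsimp only
        set N := n.toNat with hN
        have hdp0 : ((Array.replicate (N + 1) (0 : Int)).setIfInBounds 0 1).toList
            = (List.replicate (N + 1) (0 : Int)).set 0 1 := by
          rw [pvASet, Array.toList_replicate]
        have hL : ∀ k ∈ List.range' 1 N, 1 ≤ k := by
          intro k hkk
          rw [List.mem_range'_1] at hkk
          omega
        have hlen0 : ((List.replicate (N + 1) (0 : Int)).set 0 1).length = N + 1 := by simp
        have hA := pvFoldA_approx N d.toNat (List.range' 1 N) hL _ 1 hlen0 (pvInit_approx N)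
        have hB := pvFoldB_approx N (List.range' 1 N) hL _ 1 hlen0 (pvInit_approx N)
        have hPow := pvPowLoopL_approx N ((1 : Int) :: List.replicate N 0) _ 1
          (((List.range' 1 N).map pvGeom).prod * 1) d (pvRes0_approx N) hB
        rw [pvAGetD, pvAGetD, pvFoldA_bridge, pvPow_bridge, pvFoldB_bridge, hdp0, pvTA]
        rw [hA N le_rfl, hPow N le_rfl, mul_one, mul_one, one_mul, pvProdPow]

-- ===== VERDICT (by name: the statement is the Claim_ definition above) =====
theorem d_colored_partition_count_spec : Claim_equal_d_colored_partition_count := by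
  intro n d _
  exact d_colored_partition_count_spec' n d
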